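-- pv_equiv track=rewrite | github.com/grenmarket/algo | traveling_salesman.py | all_subsets_of_size
-- ===== SOURCE A (Python) =====
-- from itertools import combinations
--
-- def all_subsets_of_size(size, superset_size, starting_point):
--     S = range(1, superset_size+1)
--     combs = list(combinations(S, size))
--     sets = [frozenset(c) for c in combs]
--     result = []
--     for s in sets:
--         if starting_point in s:
--             result.append(s)
--     return frozenset(result)
-- ===== SOURCE B (Python) =====
-- from itertools import combinations
--
-- def all_subsets_of_size(size, superset_size, starting_point):
--     # enumerate only the subsets that contain starting_point:
--     # choose size-1 elements from the other superset_size-1 points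
--     if size < 1 or starting_point < 1 or starting_point > superset_size:
--         return frozenset()
--     rest = [x for x in range(1, superset_size + 1) if x != starting_point]
--     return frozenset(frozenset(sorted(c + (starting_point,)))
--                      for c in combinations(rest, size - 1))
-- ===== Notes on version B (the rewrite author's own statement) =====
-- stated objective: faster
-- what changed: Instead of enumerating all C(n,size) subsets of {1..n} and filtering those containing starting_point, B enumerates only C(n-1,size-1) subsets: it chooses size-1 elements from the n-1 other points and adds starting_point to each.
import Mathlib
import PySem

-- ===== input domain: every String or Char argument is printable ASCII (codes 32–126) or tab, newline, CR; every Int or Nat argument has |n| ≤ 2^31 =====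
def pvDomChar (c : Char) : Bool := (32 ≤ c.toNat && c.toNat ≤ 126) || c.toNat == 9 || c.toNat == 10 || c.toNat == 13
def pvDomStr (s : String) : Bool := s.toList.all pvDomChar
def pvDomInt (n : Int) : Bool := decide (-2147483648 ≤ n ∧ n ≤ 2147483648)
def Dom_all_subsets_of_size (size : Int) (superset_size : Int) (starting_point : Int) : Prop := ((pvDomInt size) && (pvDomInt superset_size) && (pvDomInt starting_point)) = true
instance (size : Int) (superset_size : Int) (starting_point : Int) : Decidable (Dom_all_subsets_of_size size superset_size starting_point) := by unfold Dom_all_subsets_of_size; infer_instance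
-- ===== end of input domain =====

-- B enumerates only the C(n-1,size-1) subsets containing starting_point (size-1 chosen
-- from the other points) instead of filtering all C(n,size) subsets: asymptotically faster.

-- ===== PORT A =====
-- itertools.combinations(S, r): the CPython iterator yields nothing (returns at once) when
-- r > len(S); this wrapper adds that short-circuit to the PySem primitive — same value on
-- every input (PySem.List.combinations_eq_nil_of_length_lt), it only avoids the blow-up.
def pyCombinations (xs : List Int) (r : Nat) : List (List Int) :=
  if xs.length < r then [] else PySem.List.combinations xs r

def all_subsets_of_size (size : Int) (superset_size : Int) (starting_point : Int) : List (List Int) :=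
  let S := PySem.List.pyRange 1 (superset_size + 1) 1
  -- size.toNat is faithful: Pre_ gives 0 ≤ size (combinations raises ValueError on size < 0)
  let combs := pyCombinations S size.toNat
  let sets := combs.map (fun c => PySem.Set.ofList c)
  let result := sets.foldl (fun acc s => if PySem.Set.contains s starting_point then acc ++ [s] else acc) []
  PySem.Set.ofList result

-- ===== PORT B =====
def all_subsets_of_size_alt (size : Int) (superset_size : Int) (starting_point : Int) : List (List Int) :=
  if size < 1 ∨ starting_point < 1 ∨ superset_size < starting_point then []
  else
    let rest := (PySem.List.pyRange 1 (superset_size + 1) 1).filter (fun x => x != starting_point)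
    PySem.Set.ofList ((pyCombinations rest (size - 1).toNat).map
      (fun c => PySem.Set.ofList (PySem.List.sorted (c ++ [starting_point]) (fun x => x))))

-- ===== PRECONDITION & SPEC =====
-- Pre_ excludes size < 0, on which A raises ValueError (itertools.combinations).
def Pre_all_subsets_of_size (size : Int) (superset_size : Int) (starting_point : Int) : Prop :=
  0 ≤ size
instance (size : Int) (superset_size : Int) (starting_point : Int) : Decidable (Pre_all_subsets_of_size size superset_size starting_point) := by unfold Pre_all_subsets_of_size; infer_instance

def pvWitness_all_subsets_of_size : Int × Int × Int := (2, 4, 3)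

def Spec_all_subsets_of_size (size : Int) (superset_size : Int) (starting_point : Int) (out : List (List Int)) : Prop := out = all_subsets_of_size_alt size superset_size starting_point
instance (size : Int) (superset_size : Int) (starting_point : Int) (out : List (List Int)) : Decidable (Spec_all_subsets_of_size size superset_size starting_point out) := by unfold Spec_all_subsets_of_size; infer_instance

-- ===== CLAIM (what is proved, stated in full; the proofs are below) =====
def Claim_equal_all_subsets_of_size : Prop := ∀ (size : Int) (superset_size : Int) (starting_point : Int), Dom_all_subsets_of_size size superset_size starting_point → Pre_all_subsets_of_size size superset_size starting_point → Spec_all_subsets_of_size size superset_size starting_point (all_subsets_of_size size superset_size starting_point)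

-- ===== LEMMAS AND PROOFS =====

lemma pyCombinations_eq (xs : List Int) (r : Nat) :
    pyCombinations xs r = PySem.List.combinations xs r := by
  unfold pyCombinations
  split
  · exact (PySem.List.combinations_eq_nil_of_length_lt xs (by omega)).symm
  · rfl

-- insertion of sp into a strictly increasing list, used to NAME the sorted order of c ++ [sp]
def insS (sp : Int) : List Int → List Int
  | [] => [sp]
  | y :: ys => if y < sp then y :: insS sp ys else sp :: y :: ys

lemma mem_insS {sp x : Int} {c : List Int} : x ∈ insS sp c ↔ x = sp ∨ x ∈ c := by
  induction c with
  | nil => simp [insS]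
  | cons y ys ih =>
    by_cases h : y < sp <;> simp [insS, h, ih] <;> tauto

lemma insS_of_all_gt {sp : Int} {c : List Int} (h : ∀ y ∈ c, sp < y) : insS sp c = sp :: c := by
  cases c with
  | nil => rfl
  | cons y ys => simp [insS, not_lt.mpr (le_of_lt (h y (by simp)))]

lemma insS_perm (sp : Int) (c : List Int) : (insS sp c).Perm (c ++ [sp]) := by
  induction c with
  | nil => simp [insS]
  | cons y ys ih =>
    by_cases h : y < sp
    · simpa [insS, h] using ih.cons y
    · simp only [insS, h, if_false]
      exact (List.perm_append_singleton sp (y :: ys)).symm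

lemma insS_pairwise {sp : Int} {c : List Int} (hc : c.Pairwise (· < ·)) (hn : sp ∉ c) :
    (insS sp c).Pairwise (· < ·) := by
  induction c with
  | nil => simp [insS]
  | cons y ys ih =>
    rcases List.pairwise_cons.mp hc with ⟨hy, hys⟩
    by_cases h : y < sp
    · simp only [insS, h, if_true]
      refine List.pairwise_cons.mpr ⟨?_, ih hys (fun hm => hn (List.mem_cons_of_mem _ hm))⟩
      intro z hz
      rcases mem_insS.mp hz with rfl | hz
      · exact h
      · exact hy z hz
    · have hne : y ≠ sp := fun he => hn (by simp [he])
      have hlt : sp < y := lt_of_le_of_ne (not_lt.mp h) (Ne.symm hne)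
      simp only [insS, h, if_false]
      refine List.pairwise_cons.mpr ⟨?_, hc⟩
      intro z hz
      rcases List.mem_cons.mp hz with rfl | hz
      · exact hlt
      · exact lt_trans hlt (hy z hz)

lemma notMem_of_mem_combinations {sp : Int} {S c : List Int} {k : Nat}
    (hc : c ∈ PySem.List.combinations S k) (hS : sp ∉ S) : sp ∉ c :=
  fun h => hS ((PySem.List.sublist_of_mem_combinations hc).subset h)

-- A's filtered enumeration over P ++ sp :: Q equals sp inserted into B's enumeration over P ++ Q
lemma comb_filter_eq_map_insS (sp : Int) :
    ∀ (P : List Int) (Q : List Int) (k : Nat),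
      (∀ x ∈ P, x < sp) → (∀ x ∈ Q, sp < x) →
      (PySem.List.combinations (P ++ sp :: Q) (k + 1)).filter (fun c => decide (sp ∈ c)) =
        (PySem.List.combinations (P ++ Q) k).map (insS sp) := by
  intro P
  induction P with
  | nil =>
    intro Q k _ hQ
    rw [List.nil_append, PySem.List.combinations_cons_succ, List.filter_append]
    have h1 : ((PySem.List.combinations Q k).map (fun c => sp :: c)).filter
        (fun c => decide (sp ∈ c)) = (PySem.List.combinations Q k).map (fun c => sp :: c) := by
      apply List.filter_eq_self.mpr
      intro c hc
      rcases List.mem_map.mp hc with ⟨d, _, rfl⟩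
      simp
    have h2 : (PySem.List.combinations Q (k + 1)).filter (fun c => decide (sp ∈ c)) = [] := by
      apply List.filter_eq_nil_iff.mpr
      intro c hc
      have := notMem_of_mem_combinations hc (fun h => lt_irrefl sp (hQ sp h))
      simpa using this
    rw [h1, h2, List.append_nil]
    apply List.map_congr_left
    intro c hc
    have hgt : ∀ y ∈ c, sp < y := fun y hy =>
      hQ y ((PySem.List.sublist_of_mem_combinations hc).subset hy)
    exact (insS_of_all_gt hgt).symm
  | cons x P' ih =>
    intro Q k hP hQ
    have hx : x < sp := hP x (by simp)
    have hP' : ∀ y ∈ P', y < sp := fun y hy => hP y (by simp [hy])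
    simp only [List.cons_append, PySem.List.combinations_cons_succ, List.filter_append]
    have hmapfilter :
        ((PySem.List.combinations (P' ++ sp :: Q) k).map (fun c => x :: c)).filter
            (fun c => decide (sp ∈ c)) =
          ((PySem.List.combinations (P' ++ sp :: Q) k).filter (fun c => decide (sp ∈ c))).map
            (fun c => x :: c) := by
      rw [List.filter_map]
      congr 1
      apply List.filter_congr
      intro c _
      simp [Function.comp, ne_of_lt hx, (ne_of_lt hx).symm]
    rw [hmapfilter, ih Q k hP' hQ]
    cases k with
    | zero =>
      simp [PySem.List.combinations_zero, insS]
    | succ j =>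
      rw [ih Q j hP' hQ]
      rw [PySem.List.combinations_cons_succ x (P' ++ Q) j, List.map_append, List.map_map,
        List.map_map]
      congr 1
      apply List.map_congr_left
      intro c _
      simp [Function.comp, insS, hx]

lemma pairwise_of_mem_combinations {L c : List Int} {k : Nat}
    (hL : L.Pairwise (· < ·)) (hc : c ∈ PySem.List.combinations L k) : c.Pairwise (· < ·) :=
  List.Pairwise.sublist (PySem.List.sublist_of_mem_combinations hc) hL

-- ===== VERDICT (by name: the statement is the Claim_ definition above) =====
-- the A-side loop+filter, normalised: map over the filtered combinations
lemma A_side_eq (size : Int) (n : Int) (sp : Int) :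
    all_subsets_of_size size n sp =
      PySem.Set.ofList (((PySem.List.combinations (PySem.List.pyRange 1 (n + 1) 1)
        size.toNat).filter (fun c => decide (sp ∈ c))).map (fun c => PySem.Set.ofList c)) := by
  simp only [all_subsets_of_size, pyCombinations_eq]
  rw [PySem.List.foldl_append_if (fun s => PySem.Set.contains s sp) (fun s => s)]
  simp only [List.nil_append, List.map_id', List.filter_map]
  congr 1
  congr 1
  apply List.filter_congr
  intro c _
  simp [Function.comp, PySem.Set.mem_ofList]

lemma pairwise_append_range (sp n : Int) :
    (PySem.List.pyRange 1 sp 1 ++ PySem.List.pyRange (sp + 1) (n + 1) 1).Pairwise (· < ·) := by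
  rw [List.pairwise_append]
  refine ⟨PySem.List.pairwise_lt_pyRange_one 1 sp, PySem.List.pairwise_lt_pyRange_one (sp+1) (n+1), ?_⟩
  intro x hx y hy
  have h1 := (PySem.List.mem_pyRange_one.mp hx).2
  have h2 := (PySem.List.mem_pyRange_one.mp hy).1
  omega

theorem all_subsets_of_size_spec : Claim_equal_all_subsets_of_size := by
  intro size n sp _ hpre
  unfold Pre_all_subsets_of_size at hpre
  unfold Spec_all_subsets_of_size
  rw [A_side_eq]
  unfold all_subsets_of_size_alt
  simp only [pyCombinations_eq]
  by_cases hout : size < 1 ∨ sp < 1 ∨ n < sp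
  · -- A's filter is empty: either size = 0 (no [] contains sp) or sp is outside the range
    rw [if_pos hout]
    have hfil : ((PySem.List.combinations (PySem.List.pyRange 1 (n + 1) 1)
        size.toNat).filter (fun c => decide (sp ∈ c))) = [] := by
      apply List.filter_eq_nil_iff.mpr
      intro c hc
      rcases hout with hs | hsp
      · have h0 : size.toNat = 0 := by omega
        rw [h0, PySem.List.combinations_zero] at hc
        simp at hc
        simp [hc]
      · have hnot : sp ∉ PySem.List.pyRange 1 (n + 1) 1 := by
          rw [PySem.List.mem_pyRange_one]
          omega
        simpa using notMem_of_mem_combinations hc hnot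
    rw [hfil]
    simp [PySem.Set.ofList]
  · rw [if_neg hout]
    push_neg at hout
    obtain ⟨hs1, hsp1, hspn⟩ := hout
    have hsplit : PySem.List.pyRange 1 (n + 1) 1 =
        PySem.List.pyRange 1 sp 1 ++ sp :: PySem.List.pyRange (sp + 1) (n + 1) 1 := by
      rw [PySem.List.pyRange_one_append 1 sp (n + 1) (by omega) (by omega),
        PySem.List.pyRange_one_cons (by omega : sp < n + 1)]
    have hP : ∀ x ∈ PySem.List.pyRange 1 sp 1, x < sp := by
      intro x hx; exact (PySem.List.mem_pyRange_one.mp hx).2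
    have hQ : ∀ x ∈ PySem.List.pyRange (sp + 1) (n + 1) 1, sp < x := by
      intro x hx; have := (PySem.List.mem_pyRange_one.mp hx).1; omega
    have hrest : (PySem.List.pyRange 1 (n + 1) 1).filter (fun x => x != sp) =
        PySem.List.pyRange 1 sp 1 ++ PySem.List.pyRange (sp + 1) (n + 1) 1 := by
      rw [hsplit, List.filter_append, List.filter_cons]
      have h1 : (PySem.List.pyRange 1 sp 1).filter (fun x => x != sp) =
          PySem.List.pyRange 1 sp 1 := by
        apply List.filter_eq_self.mpr
        intro x hx
        have := hP x hx; simp; omega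
      have h2 : (PySem.List.pyRange (sp + 1) (n + 1) 1).filter (fun x => x != sp) =
          PySem.List.pyRange (sp + 1) (n + 1) 1 := by
        apply List.filter_eq_self.mpr
        intro x hx
        have := hQ x hx; simp; omega
      simp [h1, h2]
    have hk : size.toNat = (size - 1).toNat + 1 := by omega
    rw [hrest, hsplit, hk, comb_filter_eq_map_insS sp _ _ _ hP hQ, List.map_map]
    congr 1
    apply List.map_congr_left
    intro c hc
    have hpw : c.Pairwise (· < ·) := pairwise_of_mem_combinations (pairwise_append_range sp n) hc
    have hsp : sp ∉ c := by
      apply notMem_of_mem_combinations hc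
      intro hmem
      rcases List.mem_append.mp hmem with h | h
      · exact lt_irrefl sp (hP sp h)
      · exact lt_irrefl sp (hQ sp h)
    have hins : PySem.List.sorted (c ++ [sp]) (fun x => x) = insS sp c :=
      PySem.List.sorted_eq_of_perm_of_pairwise_lt _ _ _ (insS_perm sp c) (insS_pairwise hpw hsp)
    simp [Function.comp, hins]
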